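-- pv_equiv track=rewrite | github.com/Pranathi-star/Data-Structures-and-Algos-in-Python---practice | binary_search (d&c)/search_nearly_sorted.py | search_in_nearly_sorted
-- ===== SOURCE A (Python) =====
-- def search_in_nearly_sorted(arr, target):
--     size = len(arr)
--     low, high = 0, size - 1
--
--     while low <= high:
--         mid = low + (high - low)//2
--
--         if arr[mid] == target:
--             return mid
--
--         elif mid != size - 1 and arr[mid + 1] == target:
--             return mid + 1
--
--         elif mid != 0 and arr[mid - 1] == target:
--             return mid - 1
--
--         elif arr[mid] < target:
--             low = mid + 2
--
--         elif arr[mid] > target: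
--             high = mid - 2
--
--     return -1
-- ===== SOURCE B (Python) =====
-- def search_in_nearly_sorted(arr, target):
--     n = len(arr)
--
--     def probe(mid):
--         # first matching index among mid, mid+1, mid-1 (guarded), else None
--         if arr[mid] == target:
--             return mid
--         if mid + 1 < n and arr[mid + 1] == target:
--             return mid + 1
--         if mid > 0 and arr[mid - 1] == target:
--             return mid - 1
--         return None
--
--     def go(low, high):
--         if low > high:
--             return -1
--         mid = (low + high) // 2
--         hit = probe(mid)
--         if hit is not None:
--             return hit
--         if arr[mid] < target:
--             return go(mid + 2, high)
--         return go(low, mid - 2)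
--
--     return go(0, n - 1)
-- ===== Notes on version B (the rewrite author's own statement) =====
-- stated objective: alternative
-- what changed: Iterative while-loop with an inline elif chain replaced by a recursive divide-and-conquer helper go(low, high) plus a separate neighbourhood probe(mid) helper; same search path, different decomposition.
import Mathlib
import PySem

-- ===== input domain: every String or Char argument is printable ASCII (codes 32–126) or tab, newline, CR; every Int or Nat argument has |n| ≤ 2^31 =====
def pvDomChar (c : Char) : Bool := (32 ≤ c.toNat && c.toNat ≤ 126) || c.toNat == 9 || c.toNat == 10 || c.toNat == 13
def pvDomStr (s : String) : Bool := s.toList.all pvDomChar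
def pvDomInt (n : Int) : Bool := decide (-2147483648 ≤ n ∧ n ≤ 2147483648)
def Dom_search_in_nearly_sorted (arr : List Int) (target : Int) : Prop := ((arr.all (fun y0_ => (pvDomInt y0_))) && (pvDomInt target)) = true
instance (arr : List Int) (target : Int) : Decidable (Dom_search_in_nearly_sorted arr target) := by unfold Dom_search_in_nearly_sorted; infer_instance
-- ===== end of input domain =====

-- B replaces A's iterative while-loop with a recursive divide-and-conquer helper plus a
-- separate neighbourhood-probe helper: same search path, different decomposition (objective: alternative).
-- All list indexing is provably in range on the search path, so arr[i] is ported as pyGetD arr i 0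
-- (equal to Python's arr[i] on every index actually reached).

-- ===== PORT A =====
-- while low <= high: … ported as recursion on the loop state (low, high).
def pyLoopA (arr : List Int) (target size low high : Int) : Int :=
  if hle : low ≤ high then
    let mid := low + PySem.Int.floordiv (high - low) 2
    if PySem.List.pyGetD arr mid 0 = target then mid
    else if mid ≠ size - 1 ∧ PySem.List.pyGetD arr (mid + 1) 0 = target then mid + 1
    else if mid ≠ 0 ∧ PySem.List.pyGetD arr (mid - 1) 0 = target then mid - 1
    else if PySem.List.pyGetD arr mid 0 < target then pyLoopA arr target size (mid + 2) high
    else pyLoopA arr target size low (mid - 2)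
    -- the final Python 'elif arr[mid] > target' is the only remaining case here
    -- (arr[mid] = target and arr[mid] < target were both excluded above: Int trichotomy)
  else -1
termination_by (high + 1 - low).toNat
decreasing_by
  all_goals
    have h2 := PySem.Int.floordiv_eq_ediv_of_pos (a := high - low) (b := 2) (by omega)
    omega

def search_in_nearly_sorted (arr : List Int) (target : Int) : Int :=
  pyLoopA arr target arr.length 0 (arr.length - 1)

-- ===== PORT B =====
-- probe(mid): first matching index among mid, mid+1, mid-1 (guarded), else None
def pyProbeB (arr : List Int) (target n mid : Int) : Option Int :=
  if PySem.List.pyGetD arr mid 0 = target then some mid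
  else if mid + 1 < n ∧ PySem.List.pyGetD arr (mid + 1) 0 = target then some (mid + 1)
  else if 0 < mid ∧ PySem.List.pyGetD arr (mid - 1) 0 = target then some (mid - 1)
  else none

def pyGoB (arr : List Int) (target n low high : Int) : Int :=
  if hgt : high < low then -1
  else
    let mid := PySem.Int.floordiv (low + high) 2
    match pyProbeB arr target n mid with
    | some i => i
    | none =>
      if PySem.List.pyGetD arr mid 0 < target then pyGoB arr target n (mid + 2) high
      else pyGoB arr target n low (mid - 2)
termination_by (high + 1 - low).toNat
decreasing_by
  all_goals
    have h2 := PySem.Int.floordiv_two_mid_bounds (lo := low) (hi := high) (by omega)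
    omega

def search_in_nearly_sorted_alt (arr : List Int) (target : Int) : Int :=
  pyGoB arr target arr.length 0 (arr.length - 1)

-- ===== PRECONDITION & SPEC =====
def Spec_search_in_nearly_sorted (arr : List Int) (target : Int) (out : Int) : Prop := out = search_in_nearly_sorted_alt arr target
instance (arr : List Int) (target : Int) (out : Int) : Decidable (Spec_search_in_nearly_sorted arr target out) := by unfold Spec_search_in_nearly_sorted; infer_instance

-- ===== CLAIM (what is proved, stated in full; the proofs are below) =====
def Claim_equal_search_in_nearly_sorted : Prop := ∀ (arr : List Int) (target : Int), Dom_search_in_nearly_sorted arr target → Spec_search_in_nearly_sorted arr target (search_in_nearly_sorted arr target)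

-- ===== LEMMAS AND PROOFS =====

-- Loop/recursion agreement: under the invariant 0 ≤ low and high ≤ n - 1, A's loop state
-- recursion and B's divide-and-conquer helper compute the same result (induction on the fuel k
-- bounding the interval width).
theorem pyLoopA_eq_pyGoB (arr : List Int) (target n : Int) :
    ∀ (k : Nat) (low high : Int), (high + 1 - low).toNat ≤ k → 0 ≤ low → high ≤ n - 1 →
      pyLoopA arr target n low high = pyGoB arr target n low high := by
  intro k
  induction k with
  | zero =>
    intro low high hk hlo hhi
    rw [pyLoopA, pyGoB]
    simp only [show ¬ (low ≤ high) by omega, show high < low by omega, dite_true, dite_false]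
  | succ k ih =>
    intro low high hk hlo hhi
    rw [pyLoopA, pyGoB]
    by_cases hle : low ≤ high
    · have hb := PySem.Int.floordiv_two_mid_bounds (lo := low) (hi := high) hle
      have hmid : low + PySem.Int.floordiv (high - low) 2 = PySem.Int.floordiv (low + high) 2 := by
        have h1 := PySem.Int.floordiv_eq_ediv_of_pos (a := high - low) (b := 2) (by omega)
        have h2 := PySem.Int.floordiv_eq_ediv_of_pos (a := low + high) (b := 2) (by omega)
        omega
      simp only [hle, dite_true, show ¬ high < low by omega, dite_false, hmid, pyProbeB]
      set m := PySem.Int.floordiv (low + high) 2 with hm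
      have hedge : (m ≠ n - 1) ↔ (m + 1 < n) := by omega
      have hzero : (m ≠ 0) ↔ (0 < m) := by omega
      by_cases h1 : PySem.List.pyGetD arr m 0 = target
      · simp [h1]
      · simp only [h1, if_false]
        by_cases h2 : m + 1 < n ∧ PySem.List.pyGetD arr (m + 1) 0 = target
        · simp [h2, hedge.mpr h2.1]
        · have h2' : ¬ (m ≠ n - 1 ∧ PySem.List.pyGetD arr (m + 1) 0 = target) := by
            intro hc; exact h2 ⟨hedge.mp hc.1, hc.2⟩
          simp only [h2, h2', if_false]
          by_cases h3 : 0 < m ∧ PySem.List.pyGetD arr (m - 1) 0 = target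
          · simp [h3, hzero.mpr h3.1]
          · have h3' : ¬ (m ≠ 0 ∧ PySem.List.pyGetD arr (m - 1) 0 = target) := by
              intro hc; exact h3 ⟨hzero.mp hc.1, hc.2⟩
            simp only [h3, h3', if_false]
            by_cases h4 : PySem.List.pyGetD arr m 0 < target
            · simp only [h4, if_true]
              exact ih (m + 2) high (by omega) (by omega) hhi
            · simp only [h4, if_false]
              exact ih low (m - 2) (by omega) hlo (by omega)
    · simp only [hle, dite_false, show high < low by omega, dite_true]

-- ===== VERDICT (by name: the statement is the Claim_ definition above) =====
theorem search_in_nearly_sorted_spec : Claim_equal_search_in_nearly_sorted := by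
  intro arr target _
  unfold Spec_search_in_nearly_sorted search_in_nearly_sorted search_in_nearly_sorted_alt
  exact pyLoopA_eq_pyGoB arr target arr.length ((arr.length : Int) - 1 + 1 - 0).toNat 0
    ((arr.length : Int) - 1) (le_refl _) (by omega) (by omega)
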